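-- pv_equiv track=rewrite | github.com/harmslab/phagedisplay | data-format/processors/fastqToCounts.py | _compressDictSet
-- ===== SOURCE A (Python) =====
-- def _compressDictSet(list_of_dicts,round_numbers):
--     """
--     Take a list of dictionaries, each corresponding to the counts for each
--     peptide in a round, and create a single output dictionary keying
--     sequence to the number of counts in each round.  Any round that was
--     done, but not seen in the dicts, is given a "None" entry.
--     """
--
--     # all_keys has every sequence seen
--     all_keys = []
--     for a in list_of_dicts:
--         all_keys.extend(a.keys())
--
--     # Create a template list for each key, with None for all non-sequenced
--     # rounds and 0 for all sequenced_rounds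
--     template = [None for i in range(max(round_numbers)+1)]
--     for i in round_numbers:
--         template[i] = 0
--
--     # Create final dictionary that we'll populate with values below
--     out_dict = dict([(a,template[:]) for a in all_keys])
--
--     # Populate the final dictionary
--     for i in range(len(list_of_dicts)):
--         for key, value in list_of_dicts[i].items():
--             out_dict[key][round_numbers[i]] = value
--
--     return out_dict
-- ===== SOURCE B (Python) =====
-- def _compressDictSet(list_of_dicts, round_numbers):
--     """
--     Transposed construction: instead of mutating rows of a shared output dict
--     entry-by-entry across the input dicts, compute each sequence's whole row
--     independently by scanning the rounds column-wise (per key), then emit the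
--     finished rows in first-occurrence key order.
--     """
--     template = [None for i in range(max(round_numbers)+1)]
--     for i in round_numbers:
--         template[i] = 0
--
--     keys = list(dict.fromkeys(k for d in list_of_dicts for k in d))
--
--     out_dict = {}
--     for key in keys:
--         row = template[:]
--         for i, d in enumerate(list_of_dicts):
--             if key in d:
--                 row[round_numbers[i]] = d[key]
--         out_dict[key] = row
--     return out_dict
-- ===== Notes on version B (the rewrite author's own statement) =====
-- stated objective: alternative
-- what changed: A builds a shared dict of template rows and mutates it entry-by-entry while sweeping the input dicts (row-wise incremental population); B transposes the traversal: it computes each key's complete row independently by scanning the list of dicts per key, never mutating a shared structure, at the cost of one dict lookup per key per round.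
import Mathlib
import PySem

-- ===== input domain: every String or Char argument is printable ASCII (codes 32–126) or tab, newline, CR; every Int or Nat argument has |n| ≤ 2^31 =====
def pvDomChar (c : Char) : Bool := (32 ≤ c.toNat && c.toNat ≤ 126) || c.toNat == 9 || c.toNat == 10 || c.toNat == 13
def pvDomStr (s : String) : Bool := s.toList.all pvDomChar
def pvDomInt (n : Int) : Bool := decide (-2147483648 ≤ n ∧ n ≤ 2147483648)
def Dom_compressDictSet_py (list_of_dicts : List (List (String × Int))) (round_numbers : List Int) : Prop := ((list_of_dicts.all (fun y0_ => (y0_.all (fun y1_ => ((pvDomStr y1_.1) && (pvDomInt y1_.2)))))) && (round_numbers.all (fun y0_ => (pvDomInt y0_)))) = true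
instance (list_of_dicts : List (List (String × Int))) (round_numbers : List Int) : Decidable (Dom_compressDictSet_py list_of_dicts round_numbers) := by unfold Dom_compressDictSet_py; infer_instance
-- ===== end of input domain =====

-- B (alternative): transposed traversal — each key's whole row is computed independently by a
-- per-key scan over the dicts, instead of A's incremental mutation of a shared pre-populated dict.

-- ===== PORT A =====
-- Shared helper: the 'template' list both Pythons build with identical code
-- (template = [None for i in range(max+1)]; then template[i] = 0 for i in round_numbers).
def pvTemplate (round_numbers : List Int) (mx : Int) : List (Option Int) :=
  round_numbers.foldl (fun t i => PySem.List.pySetD t i (some 0))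
    ((PySem.List.pyRange 0 (mx + 1) 1).map (fun _ => (none : Option Int)))

def compressDictSet_py (list_of_dicts : List (List (String × Int))) (round_numbers : List Int) : List (String × List (Option Int)) :=
  let all_keys : List String := list_of_dicts.foldl (fun acc a => acc ++ a.map Prod.fst) []
  match PySem.List.max? round_numbers (fun x => x) with
  | none => []  -- Python: max(round_numbers) raises ValueError on []; outside Pre_
  | some mx =>
    let template := pvTemplate round_numbers mx
    let out_dict : PySem.Dict String (List (Option Int)) :=
      PySem.Dict.ofList (all_keys.map (fun a => (a, template)))
    let out_dict := (PySem.List.pyRange 0 (PySem.List.len list_of_dicts) 1).foldl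
      (fun od i => (PySem.List.pyGetD list_of_dicts i []).foldl
        (fun od kv => od.modify kv.1 []
          (fun row => PySem.List.pySetD row (PySem.List.pyGetD round_numbers i 0) (some kv.2))) od)
      out_dict
    out_dict.items

-- ===== PORT B =====
def compressDictSet_py_alt (list_of_dicts : List (List (String × Int))) (round_numbers : List Int) : List (String × List (Option Int)) :=
  match PySem.List.max? round_numbers (fun x => x) with
  | none => []  -- same ValueError from max(round_numbers); outside Pre_
  | some mx =>
    let template := pvTemplate round_numbers mx
    let keys : List String :=
      PySem.List.dedup (list_of_dicts.flatMap (fun d => d.map Prod.fst))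
    keys.map (fun key =>
      (key, (PySem.List.enumerate list_of_dicts).foldl
        (fun row p =>
          match p.2.find? (fun kv => kv.1 == key) with
          | some kv => PySem.List.pySetD row (PySem.List.pyGetD round_numbers p.1 0) (some kv.2)
          | none => row) template))

-- ===== PRECONDITION & SPEC =====
-- Pre_ is the set of inputs on which the Python A returns normally, intersected with the dict
-- representation invariant: round_numbers nonempty (else max() raises ValueError), every
-- template assignment in range (template has length max+1, so each r needs -(max+1) <= r),
-- round_numbers[i] defined for every i whose dict is nonempty (else IndexError), and — since a
-- Python dict can never carry a duplicate key — each association list has pairwise-distinct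
-- keys (this last clause excludes no input the Python A ever receives).
def Pre_compressDictSet_py (list_of_dicts : List (List (String × Int))) (round_numbers : List Int) : Prop :=
  round_numbers ≠ [] ∧
  (∀ r ∈ round_numbers, ∃ x ∈ round_numbers, -(x + 1) ≤ r) ∧
  (∀ i ∈ List.range list_of_dicts.length, list_of_dicts.getD i [] ≠ [] → i < round_numbers.length) ∧
  (∀ d ∈ list_of_dicts, (d.map Prod.fst).Nodup)
instance (list_of_dicts : List (List (String × Int))) (round_numbers : List Int) : Decidable (Pre_compressDictSet_py list_of_dicts round_numbers) := by unfold Pre_compressDictSet_py; infer_instance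

def pvWitness_compressDictSet_py : (List (List (String × Int))) × List Int :=
  ([[("AA", 2)], [("AA", 3), ("CC", 1)]], [0, 1])
def Spec_compressDictSet_py (list_of_dicts : List (List (String × Int))) (round_numbers : List Int) (out : List (String × List (Option Int))) : Prop := out = compressDictSet_py_alt list_of_dicts round_numbers
instance (list_of_dicts : List (List (String × Int))) (round_numbers : List Int) (out : List (String × List (Option Int))) : Decidable (Spec_compressDictSet_py list_of_dicts round_numbers out) := by unfold Spec_compressDictSet_py; infer_instance

-- ===== CLAIM (what is proved, stated in full; the proofs are below) =====
def Claim_equal_compressDictSet_py : Prop := ∀ (list_of_dicts : List (List (String × Int))) (round_numbers : List Int), Dom_compressDictSet_py list_of_dicts round_numbers → Pre_compressDictSet_py list_of_dicts round_numbers → Spec_compressDictSet_py list_of_dicts round_numbers (compressDictSet_py list_of_dicts round_numbers)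

-- ===== LEMMAS AND PROOFS =====
-- Only the Nodup clause of Pre_ is used by the proof: the remaining clauses document A's crash
-- domain (the ports happen to agree there too, via the total PySem primitives).

theorem pv_contains_iff (d : PySem.Dict String (List (Option Int))) (k : String) :
    d.contains k = true ↔ k ∈ d.items.map Prod.fst := by
  simp only [PySem.Dict.contains, List.any_eq_true, beq_iff_eq, List.mem_map]

-- values all equal t: 'insert k t' of a present key is a no-op on items
theorem pv_map_replace_of_vals (xs : List (String × List (Option Int))) (k : String)
    (t : List (Option Int)) (hv : ∀ p ∈ xs, p.2 = t) :
    xs.map (fun p => if p.1 == k then (k, t) else p) = xs := by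
  have h1 : ∀ p ∈ xs, (if p.1 == k then (k, t) else p) = id p := by
    intro p hp
    by_cases h : (p.1 == k) = true
    · rw [if_pos h, id]
      have : p = (p.1, p.2) := rfl
      rw [this, hv p hp, beq_iff_eq.mp h]
    · rw [if_neg h, id]
  rw [List.map_congr_left h1, List.map_id]

-- A's pre-population pass builds exactly (dedup keys) rows, each a template copy
theorem pv_items_insertAll (t : List (Option Int)) (ks : List String) :
    ∀ (acc : List String),
    (ks.foldl (fun d k => d.insert k t) (PySem.Dict.mk (acc.map (fun k => (k, t))))).items
      = (ks.foldl PySem.Set.add acc).map (fun k => (k, t)) := by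
  induction ks with
  | nil => intro acc; rfl
  | cons k ks ih =>
    intro acc
    simp only [List.foldl_cons]
    by_cases hk : k ∈ acc
    · have hc : (PySem.Dict.mk (acc.map (fun k => (k, t)))).contains k = true := by
        rw [pv_contains_iff]; simpa [List.map_map, Function.comp] using hk
      have hins : (PySem.Dict.mk (acc.map (fun k => (k, t)))).insert k t
          = PySem.Dict.mk (acc.map (fun k => (k, t))) := by
        simp only [PySem.Dict.insert, hc, if_true]
        exact congrArg PySem.Dict.mk (pv_map_replace_of_vals _ k t (by simp))
      have hadd : PySem.Set.add acc k = acc := by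
        have hck : PySem.Set.contains acc k = true := List.contains_iff_mem.mpr hk
        simp only [PySem.Set.add, hck, if_true]
      rw [hins, hadd, ih acc]
    · have hc : (PySem.Dict.mk (acc.map (fun k => (k, t)))).contains k = false := by
        rcases Bool.eq_false_or_eq_true ((PySem.Dict.mk (acc.map (fun k => (k, t)))).contains k) with h | h
        · rw [pv_contains_iff] at h
          exact absurd (by simpa [List.map_map, Function.comp] using h) hk
        · exact h
      have hins : (PySem.Dict.mk (acc.map (fun k => (k, t)))).insert k t
          = PySem.Dict.mk ((acc ++ [k]).map (fun k => (k, t))) := by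
        simp [PySem.Dict.insert, hc]
      have hadd : PySem.Set.add acc k = acc ++ [k] := by
        simp only [PySem.Set.add, PySem.Set.contains]
        rw [if_neg]
        simp only [List.contains_iff_mem]
        exact hk
      rw [hins, hadd, ih (acc ++ [k])]

-- first entry for a present key in a constructed dict
theorem pv_getD_map (g : String → List (Option Int)) (ks : List String) (k : String)
    (h : k ∈ ks) :
    (PySem.Dict.mk (ks.map (fun x => (x, g x)))).getD k [] = g k := by
  induction ks with
  | nil => cases h
  | cons x ks ih =>
    by_cases hx : x = k
    · subst hx
      simp [PySem.Dict.getD, PySem.Dict.get?]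
    · have hmem : k ∈ ks := by
        rcases List.mem_cons.mp h with h' | h'
        · exact absurd h'.symm hx
        · exact h'
      simpa [PySem.Dict.getD, PySem.Dict.get?, List.find?_cons, hx] using ih hmem

-- THE EXCHANGE LEMMA: a fold of per-entry modifies over a keyed table equals, per key,
-- the fold of the updates addressed to that key
theorem pv_fold_modify (U : List (String × (List (Option Int) → List (Option Int)))) :
    ∀ (g : String → List (Option Int)) (ks : List String), (∀ u ∈ U, u.1 ∈ ks) →
    (U.foldl (fun d u => d.modify u.1 [] u.2) (PySem.Dict.mk (ks.map (fun k => (k, g k))))).items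
      = ks.map (fun k => (k, U.foldl (fun row u => if u.1 == k then u.2 row else row) (g k))) := by
  induction U with
  | nil => intro g ks _; simp
  | cons u U ih =>
    intro g ks hU
    have hmem : u.1 ∈ ks := hU u List.mem_cons_self
    have hc : (PySem.Dict.mk (ks.map (fun k => (k, g k)))).contains u.1 = true := by
      rw [pv_contains_iff]; simpa [List.map_map, Function.comp] using hmem
    have hget := pv_getD_map g ks u.1 hmem
    have hmod : (PySem.Dict.mk (ks.map (fun k => (k, g k)))).modify u.1 [] u.2
        = PySem.Dict.mk (ks.map (fun k => (k, if k == u.1 then u.2 (g k) else g k))) := by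
      simp only [PySem.Dict.modify, PySem.Dict.insert, hc, if_true, hget, List.map_map]
      refine congrArg PySem.Dict.mk (List.map_congr_left ?_)
      intro x _
      by_cases hx : x = u.1
      · subst hx; simp
      · simp [hx]
    simp only [List.foldl_cons, hmod]
    rw [ih (fun k => if k == u.1 then u.2 (g k) else g k) ks
      (fun v hv => hU v (List.mem_cons_of_mem _ hv))]
    refine List.map_congr_left ?_
    intro k _
    by_cases hx : u.1 = k
    · subst hx; simp
    · have hx' : ¬ k = u.1 := fun h => hx h.symm
      simp [hx, hx']

-- a fold that skips every entry
theorem pv_fold_skip (k : String) (f : (String × Int) → List (Option Int) → List (Option Int))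
    (l : List (String × Int)) (h : ∀ kv ∈ l, kv.1 ≠ k) (r : List (Option Int)) :
    l.foldl (fun r kv => if kv.1 == k then f kv r else r) r = r := by
  induction l generalizing r with
  | nil => rfl
  | cons kv l ih =>
    simp only [List.foldl_cons]
    rw [if_neg (by simpa using h kv List.mem_cons_self)]
    exact ih (fun v hv => h v (List.mem_cons_of_mem _ hv)) r

-- on a duplicate-free association list the filtered fold is the single find?-update
theorem pv_find_fold (k : String) (f : (String × Int) → List (Option Int) → List (Option Int))
    (l : List (String × Int)) (hnd : (l.map Prod.fst).Nodup) (r : List (Option Int)) :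
    l.foldl (fun r kv => if kv.1 == k then f kv r else r) r
      = match l.find? (fun kv => kv.1 == k) with
        | some kv => f kv r
        | none => r := by
  induction l generalizing r with
  | nil => rfl
  | cons kv l ih =>
    simp only [List.map_cons, List.nodup_cons] at hnd
    simp only [List.foldl_cons, List.find?_cons]
    by_cases hk : kv.1 = k
    · rw [if_pos (by simpa using hk)]
      have hfind : (fun kv => kv.1 == k) kv = true := by simpa using hk
      simp only [hfind]
      refine pv_fold_skip k f l ?_ (f kv r)
      intro v hv hvk
      have hv1 : v.1 ∈ l.map Prod.fst := List.mem_map.mpr ⟨v, hv, rfl⟩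
      exact hnd.1 (show kv.1 ∈ l.map Prod.fst by rw [hk, ← hvk]; exact hv1)
    · rw [if_neg (by simpa using hk)]
      have hfind : (fun kv => kv.1 == k) kv = false := by simpa using hk
      simp only [hfind]
      exact ih hnd.2 r

-- membership: dicts occurring in the enumeration are dicts of the input list
theorem pv_snd_mem_enumerate (ds : List (List (String × Int))) (s : Int)
    (p : Int × List (String × Int)) (hp : p ∈ PySem.List.enumerate ds s) : p.2 ∈ ds := by
  have := PySem.List.map_snd_enumerate ds s
  rw [← this]
  exact List.mem_map.mpr ⟨p, hp, rfl⟩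

-- the two ports agree on any input whose dicts have duplicate-free keys
theorem pv_ports_eq (ds : List (List (String × Int))) (rs : List Int)
    (hnd : ∀ d ∈ ds, (d.map Prod.fst).Nodup) :
    compressDictSet_py ds rs = compressDictSet_py_alt ds rs := by
  unfold compressDictSet_py compressDictSet_py_alt
  cases hmx : PySem.List.max? rs (fun x => x) with
  | none => rfl
  | some mx =>
    simp only []
    rw [PySem.List.foldl_append_eq_flatMap, List.nil_append]
    set t := pvTemplate rs mx with ht
    set ak := ds.flatMap (fun d => d.map Prod.fst) with hak
    -- the index loop is the enumerate loop
    have hloop : ∀ (init : PySem.Dict String (List (Option Int))),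
        (PySem.List.pyRange 0 (PySem.List.len ds) 1).foldl
          (fun od i => (PySem.List.pyGetD ds i []).foldl
            (fun od kv => od.modify kv.1 []
              (fun row => PySem.List.pySetD row (PySem.List.pyGetD rs i 0) (some kv.2))) od) init
        = (PySem.List.enumerate ds).foldl
          (fun od p => p.2.foldl
            (fun od kv => od.modify kv.1 []
              (fun row => PySem.List.pySetD row (PySem.List.pyGetD rs p.1 0) (some kv.2))) od) init := by
      intro init
      rw [PySem.List.enumerate_eq_map_pyRange ds ([] : List (String × Int)), List.foldl_map]
    rw [hloop]
    -- flatten A's double loop into one list U of (key, row-update) pairs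
    set U : List (String × (List (Option Int) → List (Option Int))) :=
      (PySem.List.enumerate ds).flatMap (fun p => p.2.map (fun kv =>
        (kv.1, fun row => PySem.List.pySetD row (PySem.List.pyGetD rs p.1 0) (some kv.2)))) with hUdef
    have hflat : ∀ (init : PySem.Dict String (List (Option Int))),
        (PySem.List.enumerate ds).foldl
          (fun od p => p.2.foldl
            (fun od kv => od.modify kv.1 []
              (fun row => PySem.List.pySetD row (PySem.List.pyGetD rs p.1 0) (some kv.2))) od) init
        = U.foldl (fun d u => d.modify u.1 [] u.2) init := by
      intro init
      rw [hUdef, List.foldl_flatMap]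
      refine PySem.List.foldl_congr_mem _ _ _ _ ?_
      intro acc p _
      rw [List.foldl_map]
    rw [hflat]
    -- A's initial dict: one template row per first-occurrence key
    have hinit : PySem.Dict.ofList (ak.map (fun a => (a, t)))
        = PySem.Dict.mk ((PySem.List.dedup ak).map (fun k => (k, (fun _ => t) k))) := by
      apply PySem.Dict.ext
      simp only [PySem.Dict.ofList, PySem.Dict.update, List.foldl_map]
      have := pv_items_insertAll t ak []
      simp only [List.map_nil] at this
      exact this.trans rfl
    rw [hinit]
    -- the exchange lemma
    have hkeys : ∀ u ∈ U, u.1 ∈ PySem.List.dedup ak := by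
      intro u hu
      rw [PySem.List.mem_dedup]
      rw [hUdef] at hu
      rcases List.mem_flatMap.mp hu with ⟨p, hp, hu2⟩
      rcases List.mem_map.mp hu2 with ⟨kv, hkv, hEq⟩
      rw [hak]
      exact List.mem_flatMap.mpr ⟨p.2, pv_snd_mem_enumerate ds 0 p hp,
        by rw [← hEq]; exact List.mem_map_of_mem hkv⟩
    rw [pv_fold_modify U (fun _ => t) (PySem.List.dedup ak) hkeys]
    -- per key, the filtered update fold is B's per-key scan
    refine List.map_congr_left ?_
    intro key _
    refine congrArg (Prod.mk key) ?_
    rw [hUdef, List.foldl_flatMap]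
    refine PySem.List.foldl_congr_mem _ _ _ _ ?_
    intro row p hp
    rw [List.foldl_map]
    exact pv_find_fold key _ p.2 (hnd p.2 (pv_snd_mem_enumerate ds 0 p hp)) row

-- ===== VERDICT (by name: the statement is the Claim_ definition above) =====
theorem compressDictSet_py_spec : Claim_equal_compressDictSet_py := by
  intro ds rs _ hpre
  unfold Spec_compressDictSet_py
  exact pv_ports_eq ds rs hpre.2.2.2
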